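-- pv_equiv track=rewrite | github.com/seongwon030/algorithm_Term | ALGO/알고리즘/순환/재귀.py | isDisjoint
-- ===== SOURCE A (Python) =====
-- def isDisjoint(m, A, n, B):
--     if (m <= 0 or n <= 0):
--         return True
--     elif (A[m-1] == B[n-1]):
--         return False
--     elif (A[m-1] > B[n-1]):
--         return isDisjoint(m-1, A, n, B)
--     else:
--         return isDisjoint(m, A, n-1, B)
-- ===== SOURCE B (Python) =====
-- def isDisjoint(m, A, n, B):
--     i, j = m - 1, n - 1
--     while i >= 0 and j >= 0:
--         if A[i] == B[j]:
--             return False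
--         if A[i] > B[j]:
--             i -= 1
--         else:
--             j -= 1
--     return True
-- ===== Notes on version B (the rewrite author's own statement) =====
-- stated objective: simpler
-- what changed: Tail recursion on (m, n) replaced by an iterative two-pointer while-loop over indices i, j with no call stack.
-- outside the precondition, e.g. on isDisjoint(2, [1], 1, [5]): A raises IndexError, B raises IndexError
import Mathlib
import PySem

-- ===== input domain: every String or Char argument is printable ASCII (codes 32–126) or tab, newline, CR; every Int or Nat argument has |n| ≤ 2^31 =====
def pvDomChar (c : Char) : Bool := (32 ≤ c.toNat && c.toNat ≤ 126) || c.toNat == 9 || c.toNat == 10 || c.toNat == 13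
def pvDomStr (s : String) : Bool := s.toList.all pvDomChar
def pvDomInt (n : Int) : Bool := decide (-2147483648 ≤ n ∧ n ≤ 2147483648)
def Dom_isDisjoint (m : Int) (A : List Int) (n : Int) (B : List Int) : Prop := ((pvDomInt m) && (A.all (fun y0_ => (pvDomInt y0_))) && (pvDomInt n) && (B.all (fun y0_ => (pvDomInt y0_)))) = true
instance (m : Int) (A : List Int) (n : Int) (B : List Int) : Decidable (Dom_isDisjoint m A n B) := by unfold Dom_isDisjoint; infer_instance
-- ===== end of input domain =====

-- B rewrites A's tail recursion on (m, n) as an iterative two-pointer while-loop; same comparisons, no call stack.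

-- ===== PORT A =====
-- A[m-1]/B[n-1] with 0 ≤ m-1, 0 ≤ n-1: in range whenever Pre_ holds (Python raises IndexError outside; getD 0 is unreached under Pre_).
def isDisjoint (m : Int) (A : List Int) (n : Int) (B : List Int) : Bool :=
  if m ≤ 0 ∨ n ≤ 0 then true
  else if PySem.List.pyGetD A (m-1) 0 = PySem.List.pyGetD B (n-1) 0 then false
  else if PySem.List.pyGetD A (m-1) 0 > PySem.List.pyGetD B (n-1) 0 then isDisjoint (m-1) A n B
  else isDisjoint m A (n-1) B
termination_by (m + n).toNat
decreasing_by all_goals omega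

-- ===== PORT B =====
-- the while-loop of Source B: state (i, j), one iteration per call
def isDisjointLoop (A B : List Int) (i j : Int) : Bool :=
  if i ≥ 0 ∧ j ≥ 0 then
    if PySem.List.pyGetD A i 0 = PySem.List.pyGetD B j 0 then false
    else if PySem.List.pyGetD A i 0 > PySem.List.pyGetD B j 0 then isDisjointLoop A B (i-1) j
    else isDisjointLoop A B i (j-1)
  else true
termination_by (i + j + 2).toNat
decreasing_by all_goals omega

def isDisjoint_alt (m : Int) (A : List Int) (n : Int) (B : List Int) : Bool :=
  isDisjointLoop A B (m - 1) (n - 1)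

-- ===== PRECONDITION & SPEC =====
-- Pre_ excludes exactly the inputs where Python A raises IndexError: m > len(A) or n > len(B) with both positive.
def Pre_isDisjoint (m : Int) (A : List Int) (n : Int) (B : List Int) : Prop :=
  m ≤ 0 ∨ n ≤ 0 ∨ (m ≤ A.length ∧ n ≤ B.length)
instance (m : Int) (A : List Int) (n : Int) (B : List Int) : Decidable (Pre_isDisjoint m A n B) := by unfold Pre_isDisjoint; infer_instance
def pvWitness_isDisjoint : Int × List Int × Int × List Int := (2, [1, 3], 2, [2, 4])

def Spec_isDisjoint (m : Int) (A : List Int) (n : Int) (B : List Int) (out : Bool) : Prop := out = isDisjoint_alt m A n B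
instance (m : Int) (A : List Int) (n : Int) (B : List Int) (out : Bool) : Decidable (Spec_isDisjoint m A n B out) := by unfold Spec_isDisjoint; infer_instance

-- ===== CLAIM (what is proved, stated in full; the proofs are below) =====
def Claim_equal_isDisjoint : Prop := ∀ (m : Int) (A : List Int) (n : Int) (B : List Int), Dom_isDisjoint m A n B → Pre_isDisjoint m A n B → Spec_isDisjoint m A n B (isDisjoint m A n B)

-- ===== LEMMAS AND PROOFS =====
theorem loop_eq_rec (A B : List Int) (i j : Int) :
    isDisjointLoop A B i j = isDisjoint (i+1) A (j+1) B := by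
  fun_induction isDisjointLoop A B i j with
  | case1 i j h h1 =>
      rw [isDisjoint]
      simp only [show ¬(i + 1 ≤ 0 ∨ j + 1 ≤ 0) by omega, show i + 1 - 1 = i by ring,
        show j + 1 - 1 = j by ring, h1, if_false, if_true]
  | case2 i j h h1 h2 ih =>
      rw [isDisjoint]
      simp only [show ¬(i + 1 ≤ 0 ∨ j + 1 ≤ 0) by omega, show i + 1 - 1 = i by ring,
        show j + 1 - 1 = j by ring, h1, h2, ih, if_false, if_true]
      rw [show i - 1 + 1 = i by ring]
  | case3 i j h h1 h2 ih =>
      rw [isDisjoint]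
      simp only [show ¬(i + 1 ≤ 0 ∨ j + 1 ≤ 0) by omega, show i + 1 - 1 = i by ring,
        show j + 1 - 1 = j by ring, h1, h2, ih, if_false]
      rw [show j - 1 + 1 = j by ring]
  | case4 i j h =>
      rw [isDisjoint]
      simp only [show (i + 1 ≤ 0 ∨ j + 1 ≤ 0) by omega, if_true]

-- ===== VERDICT (by name: the statement is the Claim_ definition above) =====
theorem isDisjoint_spec : Claim_equal_isDisjoint := by
  intro m A n B _ _
  unfold Spec_isDisjoint isDisjoint_alt
  rw [loop_eq_rec]
  congr 1 <;> ring
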